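-- pv_equiv track=rewrite | github.com/s4rath/DSA-fundamentals | greedyswap.py | solve
-- ===== SOURCE A (Python) =====
-- def solve(A, B):
--         temp=0
--         ideal=sorted(A,reverse=True)
--         i=0
--         j=0
--         while i<B:
--             while True:
--
--                 if ideal[j]==A[i]:
--                     break
--                 else:
--                     temp=A[i]
--                     ind=A.index(ideal[j])
--
--                     A[i]=A[ind]
--
--                     A[ind]=temp
--                     break
--             j+=1
--             i+=1
--
--         return A
-- ===== SOURCE B (Python) =====
-- def solve(A, B):
--     # Same result as the original, but the repeated A.index scans are replaced by a
--     # dict mapping each value to the ascending list of its current positions.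
--     # Mutates A in place, like the original.
--     pos = {}
--     for k, v in enumerate(A):
--         if v in pos:
--             pos[v].append(k)
--         else:
--             pos[v] = [k]
--     ideal = sorted(A, reverse=True)
--     for i in range(B):
--         v = ideal[i]
--         u = A[i]
--         if u != v:
--             ind = pos[v][0]
--             A[i] = v
--             A[ind] = u
--             pos[v] = _insort(pos[v][1:], i)
--             lu = list(pos[u])
--             lu.remove(i)
--             pos[u] = _insort(lu, ind)
--     return A
--
-- def _insort(lst, x):
--     out = []
--     k = 0
--     while k < len(lst) and lst[k] < x:
--         out.append(lst[k])
--         k += 1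
--     out.append(x)
--     out.extend(lst[k:])
--     return out
-- ===== Notes on version B (the rewrite author's own statement) =====
-- stated objective: faster
-- what changed: The per-step linear A.index scan is replaced by a dict from value to the ascending list of its current positions, maintained across swaps, so each lookup of the first occurrence is O(1) plus a small sorted-list update.
import Mathlib
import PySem

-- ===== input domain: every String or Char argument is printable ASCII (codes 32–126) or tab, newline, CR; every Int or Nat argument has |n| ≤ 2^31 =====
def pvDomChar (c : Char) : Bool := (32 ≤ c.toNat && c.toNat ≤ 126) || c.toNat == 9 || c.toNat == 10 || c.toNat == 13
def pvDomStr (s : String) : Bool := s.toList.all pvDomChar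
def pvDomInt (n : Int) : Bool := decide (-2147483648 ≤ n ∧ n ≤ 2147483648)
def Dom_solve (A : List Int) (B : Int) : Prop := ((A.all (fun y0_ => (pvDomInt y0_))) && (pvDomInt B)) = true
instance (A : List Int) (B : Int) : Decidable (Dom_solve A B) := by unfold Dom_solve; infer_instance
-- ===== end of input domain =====

-- B replaces the per-step A.index scan by a value -> ascending-positions dict maintained
-- across swaps (measurably faster); both mutate the Python argument in place the same way;
-- the equivalence proved here is about the returned list.


-- ===== PORT A =====
-- while i < B: if ideal[j] == A[i] skip, else swap A[i] with A[A.index(ideal[j])];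
-- i and j both advance by 1 per iteration; fuel (B - i).toNat bounds the loop.
def solveLoop (B : Int) (ideal : List Int) (arr : List Int) (i j : Int) : Nat → List Int
  | 0 => arr
  | fuel + 1 =>
    if i < B then
      match PySem.List.pyGet? ideal j, PySem.List.pyGet? arr i with
      | some idv, some aiv =>
        if idv = aiv then
          solveLoop B ideal arr (i + 1) (j + 1) fuel
        else
          match PySem.List.index? arr idv with
          | some ind =>
            -- temp = A[i]; A[i] = A[ind]; A[ind] = temp
            let arr1 := PySem.List.pySetD arr i (PySem.List.pyGetD arr (ind : Int) 0)
            let arr2 := PySem.List.pySetD arr1 (ind : Int) aiv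
            solveLoop B ideal arr2 (i + 1) (j + 1) fuel
          | none => arr
      | _, _ => arr
    else arr

def solve (A : List Int) (B : Int) : List Int :=
  solveLoop B (PySem.List.sorted A (fun x => x) true) A 0 0 B.toNat

-- ===== PORT B =====
-- _insort(lst, x): linear insertion keeping the list ascending (out = accumulated prefix)
def insortGo (out : List Int) (lst : List Int) (x : Int) : List Int :=
  match lst with
  | [] => out ++ [x]
  | h :: t => if h < x then insortGo (out ++ [h]) t x else out ++ x :: h :: t

-- pos = {}; for k, v in enumerate(A): append k to pos[v] (new list if v unseen)
def buildPos (A : List Int) : PySem.Dict Int (List Int) :=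
  (PySem.List.enumerate A).foldl
    (fun d kv =>
      if d.contains kv.2 then d.insert kv.2 (d.getD kv.2 [] ++ [kv.1])
      else d.insert kv.2 [kv.1])
    PySem.Dict.empty

-- for i in range(B): v = ideal[i]; u = A[i]; if u != v: swap via pos and update pos
def altLoop (ideal : List Int) (arr : List Int) (pos : PySem.Dict Int (List Int)) (i : Int) :
    Nat → List Int
  | 0 => arr
  | fuel + 1 =>
    match PySem.List.pyGet? ideal i, PySem.List.pyGet? arr i with
    | some v, some u =>
      if u = v then altLoop ideal arr pos (i + 1) fuel
      else
        match pos.getD v [] with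
        | ind :: rest =>
          let arr1 := PySem.List.pySetD arr i v
          let arr2 := PySem.List.pySetD arr1 ind u
          let pos1 := pos.insert v (insortGo [] rest i)
          match PySem.List.remove? (pos1.getD u []) i with
          | some lu => altLoop ideal arr2 (pos1.insert u (insortGo [] lu ind)) (i + 1) fuel
          | none => arr
        | [] => arr
    | _, _ => arr

def solve_alt (A : List Int) (B : Int) : List Int :=
  altLoop (PySem.List.sorted A (fun x => x) true) A (buildPos A) 0 B.toNat

-- ===== PRECONDITION & SPEC =====
-- Python A raises IndexError (ideal[j]) as soon as i reaches len(A); so exactly B ≤ len(A).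
def Pre_solve (A : List Int) (B : Int) : Prop := B ≤ (A.length : Int)
instance (A : List Int) (B : Int) : Decidable (Pre_solve A B) := by unfold Pre_solve; infer_instance
def pvWitness_solve : List Int × Int := ([3, 1, 2], 2)

def Spec_solve (A : List Int) (B : Int) (out : List Int) : Prop := out = solve_alt A B
instance (A : List Int) (B : Int) (out : List Int) : Decidable (Spec_solve A B out) := by unfold Spec_solve; infer_instance

-- ===== CLAIM (what is proved, stated in full; the proofs are below) =====
def Claim_equal_solve : Prop := ∀ (A : List Int) (B : Int), Dom_solve A B → Pre_solve A B → Spec_solve A B (solve A B)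

-- ===== LEMMAS AND PROOFS =====

-- ascending list of the positions of v in arr, as Ints (the proofs' model of pos[v])
def posOf : List Int → Int → List Int
  | [], _ => []
  | a :: t, v => (if a = v then [(0 : Int)] else []) ++ (posOf t v).map (· + 1)


theorem posOf_nonneg (arr : List Int) (v : Int) : ∀ x ∈ posOf arr v, 0 ≤ x := by
  induction arr with
  | nil => simp [posOf]
  | cons a t ih =>
    intro x hx
    simp only [posOf, List.mem_append, List.mem_map] at hx
    rcases hx with hx | ⟨y, hy, rfl⟩
    · split at hx <;> simp_all
    · have := ih y hy; omega

theorem posOf_sorted (arr : List Int) (v : Int) : (posOf arr v).Pairwise (· < ·) := by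
  induction arr with
  | nil => simp [posOf]
  | cons a t ih =>
    have hmap : ((posOf t v).map (· + 1)).Pairwise (· < ·) := by
      rw [List.pairwise_map]
      exact ih.imp (by omega)
    simp only [posOf]
    split
    · simp only [List.singleton_append, List.pairwise_cons]
      refine ⟨?_, hmap⟩
      intro x hx
      simp only [List.mem_map] at hx
      obtain ⟨y, hy, rfl⟩ := hx
      have := posOf_nonneg t v y hy; omega
    · simpa using hmap

theorem mem_posOf (arr : List Int) (v x : Int) :
    x ∈ posOf arr v ↔ ∃ k : Nat, k < arr.length ∧ arr.getD k 0 = v ∧ x = (k : Int) := by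
  induction arr generalizing x with
  | nil => simp [posOf]
  | cons a t ih =>
    simp only [posOf, List.mem_append, List.mem_map, ih]
    constructor
    · rintro (hx | ⟨y, ⟨k, hk, hv, rfl⟩, rfl⟩)
      · split at hx
        · simp only [List.mem_singleton] at hx
          exact ⟨0, by simp, by simp_all, hx⟩
        · simp at hx
      · exact ⟨k + 1, by simpa using hk, by simpa using hv, by push_cast; ring⟩
    · rintro ⟨k, hk, hv, rfl⟩
      match k with
      | 0 =>
        left
        simp only [List.getD_cons_zero] at hv
        simp [hv]
      | k + 1 =>
        right
        exact ⟨k, ⟨k, by simpa using hk, by simpa using hv, rfl⟩, by push_cast; ring⟩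

theorem head?_posOf (arr : List Int) (v : Int) :
    (posOf arr v).head? = (PySem.List.index? arr v).map (fun n => (n : Int)) := by
  induction arr with
  | nil => simp [posOf, PySem.List.index?]
  | cons a t ih =>
    by_cases h : a = v
    · subst h
      rw [PySem.List.index?_cons_self]
      simp [posOf]
    · rw [PySem.List.index?_cons_of_ne t h]
      simp only [posOf, if_neg h, List.nil_append, List.head?_map, ih]
      cases PySem.List.index? t v <;> simp




theorem sorted_eq_of_mem_iff {l1 l2 : List Int} (h1 : l1.Pairwise (· < ·))
    (h2 : l2.Pairwise (· < ·)) (hm : ∀ x, x ∈ l1 ↔ x ∈ l2) : l1 = l2 := by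
  have hp : l1.Perm l2 := by
    refine List.perm_of_nodup_nodup_toFinset_eq ?_ ?_ ?_
    · exact h1.imp ne_of_lt
    · exact h2.imp ne_of_lt
    · ext x; simp [hm x]
  exact List.eq_of_perm_of_sorted (fun a b _ _ hab hba => absurd hba (not_lt.mpr hab.le)) h1 h2 hp

theorem insortGo_acc (out lst : List Int) (x : Int) :
    insortGo out lst x = out ++ insortGo [] lst x := by
  induction lst generalizing out with
  | nil => simp [insortGo]
  | cons h t ih =>
    simp only [insortGo]
    split
    · rw [ih (out ++ [h])]; conv_rhs => rw [ih ([] ++ [h])]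
      simp
    · simp

theorem mem_insortGo (lst : List Int) (x y : Int) :
    y ∈ insortGo [] lst x ↔ y = x ∨ y ∈ lst := by
  induction lst with
  | nil => simp [insortGo]
  | cons h t ih =>
    simp only [insortGo]
    split
    · rw [insortGo_acc ([] ++ [h])]
      simp only [List.nil_append, List.singleton_append, List.mem_cons, ih]
      tauto
    · simp [List.mem_cons]

theorem sorted_insortGo (lst : List Int) (x : Int) (hs : lst.Pairwise (· < ·)) (hx : x ∉ lst) :
    (insortGo [] lst x).Pairwise (· < ·) := by
  induction lst with
  | nil => simp [insortGo]
  | cons h t ih =>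
    simp only [List.pairwise_cons] at hs
    simp only [List.mem_cons, not_or] at hx
    simp only [insortGo]
    split
    · rename_i hlt
      rw [insortGo_acc ([] ++ [h])]
      simp only [List.nil_append, List.singleton_append, List.pairwise_cons]
      refine ⟨?_, ih hs.2 hx.2⟩
      intro y hy
      rcases (mem_insortGo t x y).mp hy with rfl | hy'
      · exact hlt
      · exact hs.1 y hy'
    · rename_i hge
      have hxh : x < h := lt_of_le_of_ne (not_lt.mp hge) hx.1
      simp only [List.nil_append, List.pairwise_cons, List.mem_cons]
      refine ⟨?_, hs.1, hs.2⟩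
      intro y hy
      rcases hy with rfl | hy
      · exact hxh
      · exact hxh.trans (hs.1 y hy)

theorem posOf_append_singleton (A : List Int) (a w : Int) :
    posOf (A ++ [a]) w = posOf A w ++ (if a = w then [(A.length : Int)] else []) := by
  induction A with
  | nil => simp [posOf]
  | cons b t ih =>
    simp only [List.cons_append, posOf, ih, List.map_append, List.append_assoc]
    congr 1
    split <;> simp

theorem buildPos_inv (A : List Int) (w : Int) : (buildPos A).getD w [] = posOf A w := by
  induction A using List.reverseRecOn generalizing w with
  | nil => simp [buildPos, posOf, PySem.List.enumerate]
  | append_singleton A a ih =>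
    have henum : PySem.List.enumerate (A ++ [a]) 0
        = PySem.List.enumerate A 0 ++ [((A.length : Int), a)] := by
      rw [PySem.List.enumerate_append]
      simp [PySem.List.enumerate]
    have hstep : buildPos (A ++ [a])
        = (if (buildPos A).contains a
            then (buildPos A).insert a ((buildPos A).getD a [] ++ [(A.length : Int)])
            else (buildPos A).insert a [(A.length : Int)]) := by
      unfold buildPos
      rw [henum, List.foldl_append]
      rfl
    rw [hstep, posOf_append_singleton]
    by_cases hc : (buildPos A).contains a
    · rw [if_pos hc, PySem.Dict.getD_insert]
      by_cases hw : w = a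
      · subst hw; rw [if_pos rfl, ih, if_pos rfl]
      · rw [if_neg hw, ih, if_neg (fun h => hw h.symm), List.append_nil]
    · rw [if_neg hc, PySem.Dict.getD_insert]
      by_cases hw : w = a
      · subst hw
        rw [if_pos rfl, ← ih, PySem.Dict.getD_of_not_contains _ _ (by simpa using hc)]
        simp
      · rw [if_neg hw, ih, if_neg (fun h => hw h.symm), List.append_nil]

theorem natCast_mem_posOf (arr : List Int) (w : Int) (k : Nat) :
    ((k : Int) ∈ posOf arr w) ↔ (k < arr.length ∧ arr.getD k 0 = w) := by
  rw [mem_posOf]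
  constructor
  · rintro ⟨k', h1, h2, h3⟩
    have : k = k' := by exact_mod_cast h3
    subst this; exact ⟨h1, h2⟩
  · rintro ⟨h1, h2⟩; exact ⟨k, h1, h2, rfl⟩

theorem length_set2 (arr : List Int) (iN nN : Nat) (u v : Int) :
    ((arr.set iN v).set nN u).length = arr.length := by simp

theorem getD_set2 (arr : List Int) (iN nN k : Nat) (u v : Int)
    (hiN : iN < arr.length) (hk : k < arr.length) :
    ((arr.set iN v).set nN u).getD k 0
      = if k = nN then u else if k = iN then v else arr.getD k 0 := by
  simp only [List.getD_eq_getElem?_getD, List.getElem?_set, List.length_set]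
  by_cases h1 : k = nN
  · subst h1; rw [if_pos rfl, if_pos hk]; simp
  · rw [if_neg (fun h => h1 h.symm), if_neg h1]
    by_cases h2 : k = iN
    · subst h2; rw [if_pos rfl, if_pos hiN]; simp
    · rw [if_neg (fun h => h2 h.symm), if_neg h2]

theorem posOf_swap_v (arr : List Int) (u v : Int) (iN nN : Nat) (rest : List Int)
    (hiN : iN < arr.length) (hnN : nN < arr.length)
    (hu : arr.getD iN 0 = u) (hvv : arr.getD nN 0 = v) (huv : u ≠ v)
    (hP : posOf arr v = (nN : Int) :: rest) :
    posOf ((arr.set iN v).set nN u) v = insortGo [] rest (iN : Int) := by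
  have hsorted := posOf_sorted arr v
  rw [hP, List.pairwise_cons] at hsorted
  have hn_notin : (nN : Int) ∉ rest := fun h => lt_irrefl _ (hsorted.1 _ h)
  have hi_not_posv : (iN : Int) ∉ posOf arr v := by
    rw [natCast_mem_posOf]
    rintro ⟨_, h⟩
    exact huv (hu ▸ h ▸ rfl)
  have hi_notin_rest : (iN : Int) ∉ rest := fun h => hi_not_posv (hP ▸ List.mem_cons_of_mem _ h)
  apply sorted_eq_of_mem_iff (posOf_sorted _ _) (sorted_insortGo _ _ hsorted.2 hi_notin_rest)
  intro x
  rw [mem_insortGo]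
  constructor
  · intro hx
    rw [mem_posOf] at hx
    obtain ⟨k, hk, hval, rfl⟩ := hx
    rw [length_set2] at hk
    rw [getD_set2 _ _ _ _ _ _ hiN hk] at hval
    by_cases h1 : k = nN
    · rw [if_pos h1] at hval; exact absurd hval huv
    · rw [if_neg h1] at hval
      by_cases h2 : k = iN
      · subst h2; exact Or.inl rfl
      · rw [if_neg h2] at hval
        right
        have : (k : Int) ∈ posOf arr v := (natCast_mem_posOf arr v k).mpr ⟨hk, hval⟩
        rw [hP, List.mem_cons] at this
        rcases this with h | h
        · exact absurd (by exact_mod_cast h) h1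
        · exact h
  · rintro (rfl | hx)
    · rw [natCast_mem_posOf, length_set2, getD_set2 _ _ _ _ _ _ hiN hiN]
      have hne : iN ≠ nN := fun h => huv (by rw [← hu, h, hvv])
      rw [if_neg hne, if_pos rfl]
      exact ⟨hiN, rfl⟩
    · have hx' : x ∈ posOf arr v := hP ▸ List.mem_cons_of_mem _ hx
      rw [mem_posOf] at hx'
      obtain ⟨k, hk, hval, rfl⟩ := hx'
      have hk1 : k ≠ nN := fun h => hn_notin (h ▸ hx)
      have hk2 : k ≠ iN := fun h => hi_notin_rest (h ▸ hx)
      rw [natCast_mem_posOf, length_set2, getD_set2 _ _ _ _ _ _ hiN hk,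
        if_neg hk1, if_neg hk2]
      exact ⟨hk, hval⟩

theorem posOf_swap_u (arr : List Int) (u v : Int) (iN nN : Nat)
    (hiN : iN < arr.length) (hnN : nN < arr.length)
    (hu : arr.getD iN 0 = u) (hvv : arr.getD nN 0 = v) (huv : u ≠ v) :
    posOf ((arr.set iN v).set nN u) u
      = insortGo [] ((posOf arr u).erase (iN : Int)) (nN : Int) := by
  have hne : iN ≠ nN := fun h => huv (by rw [← hu, h, hvv])
  have hsorted := posOf_sorted arr u
  have hnodup : (posOf arr u).Nodup := hsorted.imp ne_of_lt
  have hn_not : (nN : Int) ∉ posOf arr u := by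
    rw [natCast_mem_posOf]
    rintro ⟨_, h⟩
    exact huv (by rw [← hu] at *; rw [hvv] at h; exact (h ▸ rfl))
  have herase_sorted : ((posOf arr u).erase (iN : Int)).Pairwise (· < ·) :=
    List.Pairwise.sublist List.erase_sublist hsorted
  have hn_not_erase : (nN : Int) ∉ (posOf arr u).erase (iN : Int) :=
    fun h => hn_not (List.mem_of_mem_erase h)
  apply sorted_eq_of_mem_iff (posOf_sorted _ _) (sorted_insortGo _ _ herase_sorted hn_not_erase)
  intro x
  rw [mem_insortGo, List.Nodup.mem_erase_iff hnodup]
  constructor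
  · intro hx
    rw [mem_posOf] at hx
    obtain ⟨k, hk, hval, rfl⟩ := hx
    rw [length_set2] at hk
    rw [getD_set2 _ _ _ _ _ _ hiN hk] at hval
    by_cases h1 : k = nN
    · exact Or.inl (by exact_mod_cast h1)
    · rw [if_neg h1] at hval
      by_cases h2 : k = iN
      · subst h2; rw [if_pos rfl] at hval; exact absurd hval.symm huv
      · rw [if_neg h2] at hval
        right
        refine ⟨by exact_mod_cast h2, (natCast_mem_posOf arr u k).mpr ⟨hk, hval⟩⟩
  · rintro (rfl | ⟨hxi, hx⟩)
    · rw [natCast_mem_posOf, length_set2, getD_set2 _ _ _ _ _ _ hiN hnN, if_pos rfl]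
      exact ⟨hnN, rfl⟩
    · rw [mem_posOf] at hx
      obtain ⟨k, hk, hval, rfl⟩ := hx
      have hk2 : k ≠ iN := fun h => hxi (by exact_mod_cast h)
      have hk1 : k ≠ nN := fun h => hn_not (h ▸ (natCast_mem_posOf arr u k).mpr ⟨hk, hval⟩)
      rw [natCast_mem_posOf, length_set2, getD_set2 _ _ _ _ _ _ hiN hk, if_neg hk1, if_neg hk2]
      exact ⟨hk, hval⟩

theorem posOf_swap_other (arr : List Int) (u v w : Int) (iN nN : Nat)
    (hiN : iN < arr.length) (hnN : nN < arr.length)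
    (hu : arr.getD iN 0 = u) (hvv : arr.getD nN 0 = v)
    (hw1 : w ≠ u) (hw2 : w ≠ v) :
    posOf ((arr.set iN v).set nN u) w = posOf arr w := by
  apply sorted_eq_of_mem_iff (posOf_sorted _ _) (posOf_sorted _ _)
  intro x
  rw [mem_posOf, mem_posOf]
  constructor
  · rintro ⟨k, hk, hval, rfl⟩
    rw [length_set2] at hk
    rw [getD_set2 _ _ _ _ _ _ hiN hk] at hval
    by_cases h1 : k = nN
    · rw [if_pos h1] at hval; exact absurd hval.symm hw1
    · rw [if_neg h1] at hval
      by_cases h2 : k = iN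
      · rw [if_pos h2] at hval; exact absurd hval.symm hw2
      · rw [if_neg h2] at hval; exact ⟨k, hk, hval, rfl⟩
  · rintro ⟨k, hk, hval, rfl⟩
    have h1 : k ≠ nN := fun h => hw2 (by rw [← hval, h, hvv])
    have h2 : k ≠ iN := fun h => hw1 (by rw [← hval, h, hu])
    refine ⟨k, by simpa using hk, ?_, rfl⟩
    rw [getD_set2 _ _ _ _ _ _ hiN hk, if_neg h1, if_neg h2]
    exact hval

theorem loop_eq (fuel : Nat) (Bv : Int) (ideal : List Int) :
    ∀ (arr : List Int) (pos : PySem.Dict Int (List Int)) (i : Int), 0 ≤ i →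
    i + fuel ≤ Bv → Bv ≤ (arr.length : Int) →
    (∀ w, pos.getD w [] = posOf arr w) →
    solveLoop Bv ideal arr i i fuel = altLoop ideal arr pos i fuel := by
  induction fuel with
  | zero => intro arr pos i _ _ _ _; rfl
  | succ fuel ih =>
    intro arr pos i h0 hf hB hinv
    have hiB : i < Bv := by omega
    rw [solveLoop, altLoop, if_pos hiB]
    cases hid : PySem.List.pyGet? ideal i with
    | none => rfl
    | some idv =>
      cases harr : PySem.List.pyGet? arr i with
      | none => rfl
      | some aiv =>
        simp only
        have hiN : i.toNat < arr.length := by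
          rw [PySem.List.pyGet?_of_nonneg arr h0] at harr
          exact (List.getElem?_eq_some_iff.mp harr).1
        have hgi : arr.getD i.toNat 0 = aiv := by
          rw [PySem.List.pyGet?_of_nonneg arr h0] at harr
          obtain ⟨h, hv⟩ := List.getElem?_eq_some_iff.mp harr
          rw [List.getD_eq_getElem _ _ h]; exact hv
        have hcast : ((i.toNat : Int)) = i := Int.toNat_of_nonneg h0
        by_cases heq : idv = aiv
        · rw [if_pos heq, if_pos heq.symm]
          exact ih arr pos (i + 1) (by omega) (by omega) hB hinv
        · rw [if_neg heq, if_neg (fun h => heq h.symm)]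
          cases hidx : PySem.List.index? arr idv with
          | none =>
            have : (posOf arr idv).head? = none := by
              rw [head?_posOf, hidx]; rfl
            have hnil : posOf arr idv = [] := by
              cases h' : posOf arr idv with
              | nil => rfl
              | cons a t => rw [h'] at this; simp at this
            rw [hinv idv, hnil]
          | some n =>
            have hhd : (posOf arr idv).head? = some ((n : Int)) := by
              rw [head?_posOf, hidx]; rfl
            obtain ⟨rest, hP⟩ : ∃ rest, posOf arr idv = (n : Int) :: rest := by
              cases h' : posOf arr idv with
              | nil => rw [h'] at hhd; simp at hhd
              | cons a t =>
                rw [h'] at hhd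
                simp only [List.head?_cons, Option.some.injEq] at hhd
                exact ⟨t, by rw [hhd]⟩
            obtain ⟨hn, hvn, _⟩ := PySem.List.getElem_of_index?_eq_some hidx
            have hgn : arr.getD n 0 = idv := by rw [List.getD_eq_getElem _ _ hn]; exact hvn
            rw [hinv idv, hP]
            simp only
            -- the two arrays written are the same
            have hget : PySem.List.pyGetD arr ((n : Nat) : Int) 0 = idv := by
              rw [PySem.List.pyGetD_natCast]; exact hgn
            rw [hget]
            -- B side: remove? succeeds
            have hPu : (pos.insert idv (insortGo [] rest i)).getD aiv []
                = posOf arr aiv := by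
              rw [PySem.Dict.getD_insert, if_neg (fun h => heq h.symm), hinv]
            have hmem : i ∈ posOf arr aiv := by
              rw [← hcast, natCast_mem_posOf]; exact ⟨hiN, hgi⟩
            rw [hPu, PySem.List.remove?_eq_some_erase _ _ hmem]
            simp only
            -- the next arrays coincide
            have harr2 : PySem.List.pySetD (PySem.List.pySetD arr i idv) ((n : Nat) : Int) aiv
                = (arr.set i.toNat idv).set n aiv := by
              rw [PySem.List.pySetD_of_nonneg _ _ h0,
                PySem.List.pySetD_of_nonneg _ _ (by positivity)]
              simp
            set arr2 := (arr.set i.toNat idv).set n aiv with harr2def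
            have hlen2 : (arr2.length : Int) = (arr.length : Int) := by
              rw [harr2def]; simp
            have hinv2 : ∀ w,
                ((pos.insert idv (insortGo [] rest i)).insert aiv
                  (insortGo [] ((posOf arr aiv).erase i) ((n : Int)))).getD w []
                = posOf arr2 w := by
              intro w
              rw [PySem.Dict.getD_insert]
              by_cases hw1 : w = aiv
              · rw [if_pos hw1, hw1, harr2def,
                  posOf_swap_u arr aiv idv i.toNat n hiN hn hgi hgn (fun h => heq h.symm),
                  hcast]
              · rw [if_neg hw1, PySem.Dict.getD_insert]
                by_cases hw2 : w = idv
                · rw [if_pos hw2, hw2, harr2def,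
                    posOf_swap_v arr aiv idv i.toNat n rest hiN hn hgi hgn (fun h => heq h.symm) hP,
                    hcast]
                · rw [if_neg hw2, hinv, harr2def,
                    posOf_swap_other arr aiv idv w i.toNat n hiN hn hgi hgn hw1 hw2]
            rw [harr2]
            exact ih arr2 _ (i + 1) (by omega) (by omega) (by omega) hinv2

-- ===== VERDICT (by name: the statement is the Claim_ definition above) =====
theorem solve_spec : Claim_equal_solve := by
  intro A B _ hpre
  unfold Spec_solve solve solve_alt
  by_cases hB : 0 ≤ B
  · exact loop_eq B.toNat B _ A (buildPos A) 0 le_rfl (by omega)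
      (by simpa [Pre_solve] using hpre) (fun w => buildPos_inv A w)
  · have h0 : B.toNat = 0 := by omega
    rw [h0]; rfl
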